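-- pv_equiv track=rewrite | github.com/miliar/Code_Jam_Webscraper | solutions_python/Problem_37/162.py | Solve
-- ===== SOURCE A (Python) =====
-- def ToBase(b, n):
--    """
--    >>> ToBase(2, 9)
--    1001
--    >>> ToBase(3, 9)
--    100
--    """
--    d = []
--    while n:
--       d.append(n % b)
--       n //= b
--    d.reverse()
--    return int(''.join(map(str, d)))
--
-- def Happy(n, b):
--    """
--    >>> Happy(82, 10)
--    True
--    >>> Happy(82, 3)
--    False
--    """
--    n = ToBase(b, n)
--    seen = set()
--    while n not in seen:
--       seen.add(n)
--       v = 0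
--       while n:
--          d = n % 10
--          n = n // 10
--          v += d * d
--       n = ToBase(b, v)
--       if n == 1:
--          return True
--    return False
--
-- def Solve(bases):
--     """
--     >>> Solve([2,3])
--     3
--     >>> Solve([2,3,7])
--     143
--     >>> Solve([9,10])
--     91
--     """
--     n = 1
--     while 1:
--        n += 1
--        done = True
--        for b in bases:
--           if not Happy(n, b):
--              done = False
--              break
--        if done:
--           return n
-- ===== SOURCE B (Python) =====
-- def ToBase(b, n):
--    d = []
--    while n:
--       d.append(n % b)
--       n //= b
--    d.reverse()
--    return int(''.join(map(str, d)))
--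
-- def _step(b, n):
--    v = 0
--    while n:
--       d = n % 10
--       n //= 10
--       v += d * d
--    return ToBase(b, v)
--
-- def Happy(n, b):
--    # Floyd tortoise-and-hare cycle detection: O(1) memory instead of a seen set
--    t = h = ToBase(b, n)
--    while True:
--       t = _step(b, t)
--       if t == 1:
--          return True
--       h = _step(b, _step(b, h))
--       if h == 1:
--          return True
--       if t == h:
--          return False
--
-- def Solve(bases):
--    n = 1
--    while True:
--       n += 1
--       if all(Happy(n, b) for b in bases):
--          return n
-- ===== Notes on version B (the rewrite author's own statement) =====
-- stated objective: alternative
-- what changed: Happy's growing seen-set with membership tests is replaced by Floyd tortoise-and-hare cycle detection that keeps only two chain values in O(1) memory and tests every produced value against 1; ToBase, the digit-square step and the sequential search in Solve are unchanged.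
import Mathlib
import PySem

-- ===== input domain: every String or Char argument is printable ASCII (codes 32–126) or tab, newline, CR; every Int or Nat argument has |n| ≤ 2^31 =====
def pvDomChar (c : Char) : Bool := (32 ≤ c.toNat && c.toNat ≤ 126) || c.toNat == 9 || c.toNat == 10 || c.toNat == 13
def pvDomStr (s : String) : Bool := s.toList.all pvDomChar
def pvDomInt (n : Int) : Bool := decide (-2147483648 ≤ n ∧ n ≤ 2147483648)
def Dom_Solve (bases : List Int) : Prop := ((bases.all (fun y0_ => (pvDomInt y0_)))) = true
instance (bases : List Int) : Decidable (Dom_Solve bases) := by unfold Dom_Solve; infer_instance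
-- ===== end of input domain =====

-- B replaces Happy's growing seen-set with Floyd tortoise-and-hare cycle detection (O(1) memory); ToBase and the
-- digit-square step are byte-for-byte the same, so those helpers are shared by both ports below.

-- ===== PORT A =====
-- shared helper: v = sum of squares of the decimal digits of n ('while n: d=n%10; n//=10; v+=d*d').
-- Fuel n.toNat+1 always suffices for n ≥ 0 (n strictly shrinks under //10); for n < 0 Python diverges,
-- the 0 < n guard is a totality guard only (such n are unreachable under Pre_Solve).
def sumsqF : Nat → Int → Int → Int
  | 0, v, _ => v
  | fu+1, v, n =>
    if 0 < n then sumsqF fu (v + PySem.Int.mod n 10 * PySem.Int.mod n 10) (PySem.Int.floordiv n 10) else v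

def sumsq (n : Int) : Int := sumsqF (n.toNat + 1) 0 n

-- shared helper: the digit list of n in base b, least significant first ('while n: d.append(n%b); n//=b').
-- Fuel n.toNat+1 suffices for n ≥ 0, b ≥ 2; for b < 2 Python raises (b = 0) or diverges — the 2 ≤ b guard is a
-- totality guard, such bases are outside Pre_Solve.
def toBaseRevF : Nat → Int → Int → List Int
  | 0, _, _ => []
  | fu+1, b, n =>
    if 0 < n ∧ 2 ≤ b then PySem.Int.mod n b :: toBaseRevF fu b (PySem.Int.floordiv n b) else []

-- shared helper: ToBase(b, n) = int(''.join(map(str, reversed digit list))).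
-- getD 0 is the totality default where Python's int('') raises (only for n = 0, unreachable here).
def toBase (b n : Int) : Int :=
  (PySem.Int.ofStr? (PySem.Str.join "" (((toBaseRevF (n.toNat + 1) b n).reverse).map PySem.Int.toStr))).getD 0

-- shared helper: one step of the happy chain, ToBase(b, sum of squares of decimal digits of x)
def step (b x : Int) : Int := toBase b (sumsq x)

-- A's Happy loop: 'while n not in seen: seen.add(n); n = step; if n == 1: return True' / 'return False'.
-- Fuel 2000000 is a totality guard (the chain repeats a value long before that); fuel-out default False.
def loopA : Nat → Int → PySem.Set Int → Int → Bool
  | 0, _, _, _ => false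
  | fu+1, b, seen, x =>
    if PySem.Set.contains seen x then false
    else
      let x' := step b x
      if x' = 1 then true else loopA fu b (PySem.Set.add seen x) x'

def happyA (n b : Int) : Bool := loopA 2000000 b PySem.Set.empty (toBase b n)

-- A's for-loop with done flag and break
def allHappyA (n : Int) : List Int → Bool
  | [] => true
  | b :: rest => if ¬ happyA n b then false else allHappyA n rest

-- A's 'n = 1; while 1: n += 1; …'; fuel is a totality guard (Python diverges if no common happy number exists)
def solveLoopA : Nat → Int → List Int → Int
  | 0, _, _ => 0
  | fu+1, n, bases =>
    if allHappyA (n + 1) bases then n + 1 else solveLoopA fu (n + 1) bases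

def Solve (bases : List Int) : Int := solveLoopA 100000000 1 bases

-- ===== PORT B =====
-- B's Happy: Floyd cycle detection; tortoise advances one step, hare two, every produced value is tested against 1.
-- Fuel 1000000 (half of A's: the hare walks 2 steps per round) is the same totality guard; fuel-out default False.
def floydB : Nat → Int → Int → Int → Bool
  | 0, _, _, _ => false
  | fu+1, b, t, h =>
    let t' := step b t
    if t' = 1 then true
    else
      let h' := step b (step b h)
      if h' = 1 then true
      else if t' = h' then false
      else floydB fu b t' h'

def happyB (n b : Int) : Bool :=
  let x := toBase b n
  floydB 1000000 b x x

-- B's 'while True: n += 1; if all(Happy(n, b) for b in bases): return n'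
def solveLoopB : Nat → Int → List Int → Int
  | 0, _, _ => 0
  | fu+1, n, bases =>
    if bases.all (fun b => happyB (n + 1) b) then n + 1 else solveLoopB fu (n + 1) bases

def Solve_alt (bases : List Int) : Int := solveLoopB 100000000 1 bases

-- ===== PRECONDITION & SPEC =====
-- Pre_Solve: every base is ≥ 2. Outside it A never returns normally: b = 0 raises ZeroDivisionError,
-- b = 1 loops forever in ToBase, and b < 0 raises ValueError in int() or loops forever on a negative chain value.
def Pre_Solve (bases : List Int) : Prop := ∀ b ∈ bases, 2 ≤ b
instance (bases : List Int) : Decidable (Pre_Solve bases) := by unfold Pre_Solve; infer_instance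

def pvWitness_Solve : List Int := [9, 10]

def Spec_Solve (bases : List Int) (out : Int) : Prop := out = Solve_alt bases
instance (bases : List Int) (out : Int) : Decidable (Spec_Solve bases out) := by unfold Spec_Solve; infer_instance

-- ===== CLAIM (what is proved, stated in full; the proofs are below) =====
def Claim_equal_Solve : Prop := ∀ (bases : List Int), Dom_Solve bases → Pre_Solve bases → Spec_Solve bases (Solve bases)

-- ===== LEMMAS AND PROOFS =====

-- 1 is a fixed point of the chain step for every base b ≥ 2
lemma step_one (b : Int) (hb : 2 ≤ b) : step b 1 = 1 := by
  have h1 : PySem.Int.mod 1 b = 1 := by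
    rw [PySem.Int.mod_eq_emod_of_pos (by omega)]
    exact Int.emod_eq_of_lt (by norm_num) (by omega)
  have h2 : PySem.Int.floordiv 1 b = 0 := by
    rw [PySem.Int.floordiv_eq_ediv_of_pos (by omega)]
    exact Int.ediv_eq_zero_of_lt (by norm_num) (by omega)
  have hs : sumsq 1 = 1 := rfl
  show toBase b (sumsq 1) = 1
  rw [hs]
  have hd : toBaseRevF ((1 : Int).toNat + 1) b 1 = [1] := by
    simp [toBaseRevF, hb, h1, h2]
  unfold toBase
  rw [hd]
  decide

-- once the chain hits 1 it stays at 1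
lemma reach_mono (f : Int → Int) (x : Int) (hf : f 1 = 1) (k0 m : Nat)
    (h1 : f^[k0] x = 1) (hm : k0 ≤ m) : f^[m] x = 1 := by
  have hme : m = (m - k0) + k0 := by omega
  rw [hme, Function.iterate_add_apply, h1, Function.iterate_fixed hf]

-- after a repeat f^[i] x = f^[k] x, every later iterate equals some iterate with index in [i, k)
lemma iter_landing (f : Int → Int) (x : Int) (i k : Nat) (hik : i < k) (heq : f^[i] x = f^[k] x) :
    ∀ m, i ≤ m → ∃ m', i ≤ m' ∧ m' < k ∧ f^[m] x = f^[m'] x := by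
  intro m
  induction m using Nat.strong_induction_on with
  | _ m ih =>
    intro him
    by_cases hmk : m < k
    · exact ⟨m, him, hmk, rfl⟩
    · have hstep : f^[m] x = f^[m - (k - i)] x := by
        calc f^[m] x = f^[(m - k) + k] x := by rw [show (m - k) + k = m by omega]
          _ = f^[m - k] (f^[k] x) := Function.iterate_add_apply f (m - k) k x
          _ = f^[m - k] (f^[i] x) := by rw [heq]
          _ = f^[(m - k) + i] x := (Function.iterate_add_apply f (m - k) i x).symm
          _ = f^[m - (k - i)] x := by rw [show (m - k) + i = m - (k - i) by omega]
      obtain ⟨m', h1', h2', h3'⟩ := ih (m - (k - i)) (by omega) (by omega)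
      exact ⟨m', h1', h2', hstep.trans h3'⟩

-- if the chain reaches 1 first at step k0, no value repeats strictly before step k0
lemma no_cycle (f : Int → Int) (x : Int) (hf : f 1 = 1) (k0 : Nat) (h1 : f^[k0] x = 1)
    (hmin : ∀ j, 1 ≤ j → j < k0 → f^[j] x ≠ 1) :
    ∀ i j, i < j → j < k0 → f^[i] x ≠ f^[j] x := by
  intro i j hij hjk heq
  obtain ⟨m', him', hm'j, hval⟩ := iter_landing f x i j hij heq k0 (by omega)
  have hm'1 : f^[m'] x = 1 := hval.symm.trans h1
  by_cases hm0 : 1 ≤ m'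
  · exact hmin m' hm0 (by omega) hm'1
  · have hx : x = 1 := by simpa [show m' = 0 by omega] using hm'1
    have hone : f^[1] x = 1 := by simp [hx, hf]
    have hk1 : k0 = 1 := by
      by_contra hne
      exact hmin 1 le_rfl (by omega) hone
    omega

-- soundness of A's loop: it answers True only because some iterate within fuel is 1
lemma loopA_sound (b : Int) :
    ∀ fu (seen : PySem.Set Int) x, loopA fu b seen x = true →
      ∃ k, 1 ≤ k ∧ k ≤ fu ∧ (step b)^[k] x = 1 := by
  intro fu
  induction fu with
  | zero => intro seen x h; simp [loopA] at h
  | succ fu ih =>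
    intro seen x h
    unfold loopA at h
    by_cases hc : PySem.Set.contains seen x
    · rw [if_pos hc] at h; cases h
    · simp only [hc, if_false, Bool.false_eq_true] at h
      by_cases h1 : step b x = 1
      · exact ⟨1, le_rfl, by omega, by simpa using h1⟩
      · simp only [h1, if_false] at h
        obtain ⟨k, hk1, hk2, hk3⟩ := ih _ _ h
        exact ⟨k + 1, by omega, by omega, by rw [Function.iterate_succ_apply]; exact hk3⟩

-- completeness of A's loop: reaching 1 first at step k0 ≤ j + fu makes it answer True
lemma loopA_true (b x0 : Int) (hf : step b 1 = 1) (k0 : Nat)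
    (h1 : (step b)^[k0] x0 = 1) (hmin : ∀ j, 1 ≤ j → j < k0 → (step b)^[j] x0 ≠ 1) :
    ∀ fu j (seen : PySem.Set Int), k0 ≤ j + fu → j < k0 →
      (∀ y, y ∈ seen ↔ ∃ i, i < j ∧ (step b)^[i] x0 = y) →
      loopA fu b seen ((step b)^[j] x0) = true := by
  intro fu
  induction fu with
  | zero => intro j seen hfu hj _; omega
  | succ fu ih =>
    intro j seen hfu hj hseen
    unfold loopA
    have hnotmem : ¬ PySem.Set.contains seen ((step b)^[j] x0) = true := by
      rw [PySem.Set.contains_iff, hseen]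
      rintro ⟨i, hi, hival⟩
      exact no_cycle (step b) x0 hf k0 h1 hmin i j hi hj hival
    rw [if_neg (by simpa using hnotmem)]
    have hx' : step b ((step b)^[j] x0) = (step b)^[j+1] x0 :=
      (Function.iterate_succ_apply' (step b) j x0).symm
    by_cases hone : (step b)^[j+1] x0 = 1
    · rw [if_pos (by rw [hx']; exact hone)]
    · have hj1 : j + 1 < k0 := by
        rcases Nat.lt_or_ge (j+1) k0 with h | h
        · exact h
        · exact absurd (reach_mono (step b) x0 hf k0 (j+1) h1 h) hone
      rw [if_neg (by rw [hx']; exact hone), hx']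
      exact ih (j+1) _ (by omega) hj1 (by
        intro y
        rw [PySem.Set.mem_add, hseen]
        constructor
        · rintro (⟨i, hi, hv⟩ | hv)
          · exact ⟨i, by omega, hv⟩
          · exact ⟨j, by omega, hv.symm⟩
        · rintro ⟨i, hi, hv⟩
          rcases Nat.lt_or_ge i j with h' | h'
          · exact Or.inl ⟨i, h', hv⟩
          · exact Or.inr (by rw [← hv, show i = j by omega]))

-- soundness of B's Floyd loop
lemma floyd_sound (b : Int) :
    ∀ fu t h, floydB fu b t h = true →
      (∃ k, 1 ≤ k ∧ k ≤ fu ∧ (step b)^[k] t = 1) ∨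
      (∃ k, 1 ≤ k ∧ k ≤ 2 * fu ∧ (step b)^[k] h = 1) := by
  intro fu
  induction fu with
  | zero => intro t h hh; simp [floydB] at hh
  | succ fu ih =>
    intro t h hh
    unfold floydB at hh
    by_cases ht : step b t = 1
    · exact Or.inl ⟨1, le_rfl, by omega, by simpa using ht⟩
    · simp only [ht, if_false] at hh
      by_cases hhh : step b (step b h) = 1
      · refine Or.inr ⟨2, by omega, by omega, ?_⟩
        rw [show (2 : Nat) = 1 + 1 from rfl, Function.iterate_add_apply]
        simpa using hhh
      · simp only [hhh, if_false] at hh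
        by_cases hm : step b t = step b (step b h)
        · simp [hm] at hh
        · simp only [hm, if_false] at hh
          rcases ih _ _ hh with ⟨k, hk1, hk2, hk3⟩ | ⟨k, hk1, hk2, hk3⟩
          · exact Or.inl ⟨k + 1, by omega, by omega,
              by rw [Function.iterate_succ_apply]; exact hk3⟩
          · refine Or.inr ⟨k + 2, by omega, by omega, ?_⟩
            rw [show k + 2 = k + (1 + 1) from rfl, Function.iterate_add_apply,
                Function.iterate_add_apply]
            simpa using hk3
    
-- completeness of B's Floyd loop
lemma floyd_true (b x0 : Int) (hf : step b 1 = 1) (k0 : Nat)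
    (h1 : (step b)^[k0] x0 = 1) (hmin : ∀ j, 1 ≤ j → j < k0 → (step b)^[j] x0 ≠ 1) :
    ∀ fu j, k0 ≤ 2 * (j + fu) → 2 * j < k0 →
      floydB fu b ((step b)^[j] x0) ((step b)^[2 * j] x0) = true := by
  intro fu
  induction fu with
  | zero => intro j hfu hj; omega
  | succ fu ih =>
    intro j hfu hj
    unfold floydB
    have ht' : step b ((step b)^[j] x0) = (step b)^[j+1] x0 :=
      (Function.iterate_succ_apply' (step b) j x0).symm
    have hh' : step b (step b ((step b)^[2*j] x0)) = (step b)^[2*j+2] x0 := by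
      rw [show 2*j+2 = (2*j+1)+1 by omega, Function.iterate_succ_apply',
          Function.iterate_succ_apply']
    by_cases ht1 : (step b)^[j+1] x0 = 1
    · rw [if_pos (by rw [ht']; exact ht1)]
    · have hjk : j + 1 < k0 := by
        rcases Nat.lt_or_ge (j+1) k0 with h | h
        · exact h
        · exact absurd (reach_mono (step b) x0 hf k0 (j+1) h1 h) ht1
      rw [if_neg (by rw [ht']; exact ht1)]
      by_cases hh1 : (step b)^[2*j+2] x0 = 1
      · rw [if_pos (by rw [hh']; exact hh1)]
      · have hjk2 : 2*j + 2 < k0 := by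
          rcases Nat.lt_or_ge (2*j+2) k0 with h | h
          · exact h
          · exact absurd (reach_mono (step b) x0 hf k0 (2*j+2) h1 h) hh1
        rw [if_neg (by rw [hh']; exact hh1)]
        have hmeet : ¬ (step b)^[j+1] x0 = (step b)^[2*j+2] x0 :=
          no_cycle (step b) x0 hf k0 h1 hmin (j+1) (2*j+2) (by omega) hjk2
        rw [if_neg (by rw [ht', hh']; exact hmeet), ht', hh',
            show 2*j+2 = 2*(j+1) by omega]
        exact ih (j+1) (by omega) (by omega)

-- the two Happy implementations agree for every base b ≥ 2
lemma happy_eq (n b : Int) (hb : 2 ≤ b) : happyA n b = happyB n b := by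
  have hf : step b 1 = 1 := step_one b hb
  unfold happyA happyB
  set x0 := toBase b n with hx0
  by_cases hP : ∃ k, 1 ≤ k ∧ (step b)^[k] x0 = 1
  · have hspec := Nat.find_spec hP
    set k0 := Nat.find hP with hk0def
    have hk0 : 1 ≤ k0 := hspec.1
    have h1 : (step b)^[k0] x0 = 1 := hspec.2
    have hmin : ∀ j, 1 ≤ j → j < k0 → (step b)^[j] x0 ≠ 1 := by
      intro j hj1 hjlt hval
      exact Nat.find_min hP hjlt ⟨hj1, hval⟩
    by_cases hle : k0 ≤ 2000000
    · have hA : loopA 2000000 b PySem.Set.empty x0 = true := by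
        have := loopA_true b x0 hf k0 h1 hmin 2000000 0 PySem.Set.empty
          (by omega) (by omega) (by intro y; simp [PySem.Set.empty])
        simpa using this
      have hB : floydB 1000000 b x0 x0 = true := by
        have := floyd_true b x0 hf k0 h1 hmin 1000000 0 (by omega) (by omega)
        simpa using this
      rw [hA, hB]
    · have hA : loopA 2000000 b PySem.Set.empty x0 = false := by
        cases hA : loopA 2000000 b PySem.Set.empty x0 with
        | false => rfl
        | true =>
          obtain ⟨k, hk1, hk2, hk3⟩ := loopA_sound b _ _ _ hA
          have : k0 ≤ k := le_of_not_gt fun hlt => Nat.find_min hP hlt ⟨hk1, hk3⟩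
          omega
      have hB : floydB 1000000 b x0 x0 = false := by
        cases hB : floydB 1000000 b x0 x0 with
        | false => rfl
        | true =>
          rcases floyd_sound b _ _ _ hB with ⟨k, hk1, hk2, hk3⟩ | ⟨k, hk1, hk2, hk3⟩ <;>
          · have : k0 ≤ k := le_of_not_gt fun hlt => Nat.find_min hP hlt ⟨hk1, hk3⟩
            omega
      rw [hA, hB]
  · simp only [not_exists, not_and] at hP
    have hA : loopA 2000000 b PySem.Set.empty x0 = false := by
      cases hA : loopA 2000000 b PySem.Set.empty x0 with
      | false => rfl
      | true =>
        obtain ⟨k, hk1, _, hk3⟩ := loopA_sound b _ _ _ hA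
        exact absurd hk3 (hP k hk1)
    have hB : floydB 1000000 b x0 x0 = false := by
      cases hB : floydB 1000000 b x0 x0 with
      | false => rfl
      | true =>
        rcases floyd_sound b _ _ _ hB with ⟨k, hk1, _, hk3⟩ | ⟨k, hk1, _, hk3⟩ <;>
          exact absurd hk3 (hP k hk1)
    rw [hA, hB]

-- A's flagged for-loop agrees with B's all(...) for bases that are all ≥ 2
lemma all_eq (n : Int) : ∀ bases : List Int, (∀ b ∈ bases, 2 ≤ b) →
    allHappyA n bases = bases.all (fun b => happyB n b) := by
  intro bases
  induction bases with
  | nil => intro _; rfl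
  | cons b rest ih =>
    intro hpre
    have hb := hpre b (List.mem_cons_self ..)
    rw [List.all_cons, ← happy_eq n b hb]
    unfold allHappyA
    cases h : happyA n b <;> simp [h, ih (fun x hx => hpre x (List.mem_cons_of_mem _ hx))]

-- the two search loops coincide
lemma solveLoop_eq (bases : List Int) (hpre : ∀ b ∈ bases, 2 ≤ b) :
    ∀ fu n, solveLoopA fu n bases = solveLoopB fu n bases := by
  intro fu
  induction fu with
  | zero => intro n; rfl
  | succ fu ih =>
    intro n
    unfold solveLoopA solveLoopB
    rw [all_eq (n + 1) bases hpre]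
    by_cases h : bases.all (fun b => happyB (n + 1) b) = true <;> simp [h, ih]

-- ===== VERDICT (by name: the statement is the Claim_ definition above) =====
theorem Solve_spec : Claim_equal_Solve := by
  intro bases _ hpre
  unfold Spec_Solve Solve Solve_alt
  exact solveLoop_eq bases hpre 100000000 1
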